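-- pv_equiv track=rewrite | github.com/Arsen1302/Code-copy-detector | TestData/solutions/problem_1097_4.py | solution_1097_4
-- ===== SOURCE A (Python) =====
-- def solution_1097_4(s: str) -> int:
--     ans = -1
--     hashmap = {}
--     for i, ch in enumerate(s):
--         if ch not in hashmap:
--             hashmap[ch] = i
--         else:
--             ans = max(ans, i - hashmap[ch] - 1)
--     return ans
-- ===== SOURCE B (Python) =====
-- def solution_1097_4(s: str) -> int:
--     # max gap between two equal characters (chars strictly between first and
--     # last occurrence), -1 if no character repeats
--     r = s[::-1]
--     n = len(s)
--     return max((n - 2 - r.index(c) - s.index(c) for c in set(s)), default=-1)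
-- ===== Notes on version B (the rewrite author's own statement) =====
-- stated objective: simpler
-- what changed: Replaces the single-pass loop that maintains a first-occurrence hashmap and an incremental max by a one-liner over the distinct characters: for each c in set(s) the gap is computed from its first and last occurrence (s.index and reversed-string index) and the maximum is taken with default -1.
import Mathlib
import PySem

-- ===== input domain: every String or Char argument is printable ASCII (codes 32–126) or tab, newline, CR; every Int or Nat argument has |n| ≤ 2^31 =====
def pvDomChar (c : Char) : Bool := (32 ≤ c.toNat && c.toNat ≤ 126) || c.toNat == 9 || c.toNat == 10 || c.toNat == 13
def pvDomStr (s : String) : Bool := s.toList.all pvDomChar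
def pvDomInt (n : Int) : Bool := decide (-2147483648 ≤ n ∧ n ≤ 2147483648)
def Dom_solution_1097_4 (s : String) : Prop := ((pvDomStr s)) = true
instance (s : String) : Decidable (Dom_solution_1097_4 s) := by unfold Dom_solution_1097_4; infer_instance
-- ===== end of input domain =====

-- B computes the same value from first/last occurrences of each distinct character
-- instead of A's single pass with a first-occurrence hashmap and an incremental max.

-- ===== PORT A =====
-- loop body of A: 'if ch not in hashmap: hashmap[ch] = i else: ans = max(ans, i - hashmap[ch] - 1)'
-- (in the else branch the key is present, so 'hashmap[ch]' never raises; getD 0 is exact there)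
def pvStepA (st : Int × PySem.Dict Char Int) (p : Int × Char) : Int × PySem.Dict Char Int :=
  if ¬ (st.2.contains p.2) then (st.1, st.2.insert p.2 p.1)
  else (max st.1 (p.1 - st.2.getD p.2 0 - 1), st.2)

def solution_1097_4 (s : String) : Int :=
  ((PySem.List.enumerate s.toList 0).foldl pvStepA (-1, PySem.Dict.empty)).1

-- ===== PORT B =====
-- r = s[::-1] is the exact reversal; c ∈ set(s) guarantees both .index calls return, so getD 0 is exact
def solution_1097_4_alt (s : String) : Int :=
  let L := s.toList
  let r := L.reverse
  let n : Int := PySem.Str.len s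
  PySem.List.maxD
    ((PySem.Set.ofList L).map (fun c =>
      n - 2 - (((PySem.List.index? r c).getD 0 : Nat) : Int)
            - (((PySem.List.index? L c).getD 0 : Nat) : Int)))
    (fun x => x) (-1)

-- ===== PRECONDITION & SPEC =====
def Spec_solution_1097_4 (s : String) (out : Int) : Prop := out = solution_1097_4_alt s
instance (s : String) (out : Int) : Decidable (Spec_solution_1097_4 s out) := by unfold Spec_solution_1097_4; infer_instance

-- ===== CLAIM (what is proved, stated in full; the proofs are below) =====
def Claim_equal_solution_1097_4 : Prop := ∀ (s : String), Dom_solution_1097_4 s → Spec_solution_1097_4 s (solution_1097_4 s)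

-- ===== LEMMAS AND PROOFS =====

-- B's per-character gap, as a function of the character list
def pvTerm (L : List Char) (c : Char) : Int :=
  (L.length : Int) - 2 - (((PySem.List.index? L.reverse c).getD 0 : Nat) : Int)
                       - (((PySem.List.index? L c).getD 0 : Nat) : Int)

-- A's fold, as a function of the character list
def pvAFold (L : List Char) : Int × PySem.Dict Char Int :=
  (PySem.List.enumerate L 0).foldl pvStepA (-1, PySem.Dict.empty)

lemma pvAFold_append (L : List Char) (c : Char) :
    pvAFold (L ++ [c]) = pvStepA (pvAFold L) ((L.length : Int), c) := by
  simp [pvAFold, PySem.List.enumerate_append, PySem.List.enumerate]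

lemma pvIndexAppendNe (L : List Char) (c c' : Char) (hcc : c ≠ c') :
    PySem.List.index? (L ++ [c']) c = PySem.List.index? L c := by
  by_cases hc : c ∈ L
  · exact PySem.List.index?_append_of_mem _ hc
  · rw [(PySem.List.index?_eq_none_iff _ _).mpr hc,
      (PySem.List.index?_eq_none_iff _ _).mpr (by
        simp only [List.mem_append, List.mem_singleton]
        rintro (h | h) <;> [exact hc h; exact hcc h])]

lemma pvDictA (L : List Char) :
    ∀ c, (pvAFold L).2.get? c = (PySem.List.index? L c).map (fun k => (k : Int)) := by
  induction L using List.reverseRecOn with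
  | nil =>
    intro c
    simp [pvAFold, PySem.List.enumerate, PySem.Dict.get?_empty, PySem.List.index?]
  | append_singleton L c' ih =>
    intro c
    rw [pvAFold_append]
    simp only [pvStepA]
    have hcont : (pvAFold L).2.contains c' = (PySem.List.index? L c').isSome := by
      rw [PySem.Dict.contains_eq_isSome_get?, ih c']
      cases PySem.List.index? L c' <;> rfl
    by_cases hc' : c' ∈ L
    · rw [if_neg (by
        rw [hcont]
        simp [hc'])]
      by_cases hcc : c = c'
      · subst hcc
        rw [ih c, PySem.List.index?_append_of_mem _ hc']
      · rw [ih c, pvIndexAppendNe L c c' hcc]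
    · rw [if_pos (by
        rw [hcont]
        simp [hc'])]
      by_cases hcc : c = c'
      · subst hcc
        rw [PySem.Dict.get?_insert_self, PySem.List.index?_append_singleton_self L c hc']
        rfl
      · rw [PySem.Dict.get?_insert_of_ne _ _ hcc, ih c, pvIndexAppendNe L c c' hcc]

lemma pvIndexSome {L : List Char} {d : Char} (hd : d ∈ L) :
    ∃ j, PySem.List.index? L d = some j := by
  exact Option.isSome_iff_exists.mp ((PySem.List.index?_isSome_iff L d).mpr hd)

lemma pvTerm_append_ne {L : List Char} {d c : Char} (hd : d ∈ L) (hne : d ≠ c) :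
    pvTerm (L ++ [c]) d = pvTerm L d := by
  obtain ⟨j, hj⟩ := pvIndexSome (L := L.reverse) (List.mem_reverse.mpr hd)
  unfold pvTerm
  rw [PySem.List.index?_append_of_mem _ hd,
    show (L ++ [c]).reverse = c :: L.reverse by simp,
    PySem.List.index?_cons_of_ne _ hne.symm, hj]
  simp only [Option.map_some, Option.getD_some, List.length_append, List.length_singleton]
  push_cast
  ring

lemma pvTerm_append_self_mem {L : List Char} {c : Char} (hc : c ∈ L) :
    pvTerm (L ++ [c]) c = (L.length : Int) - (((PySem.List.index? L c).getD 0 : Nat) : Int) - 1 := by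
  unfold pvTerm
  rw [PySem.List.index?_append_of_mem _ hc,
    show (L ++ [c]).reverse = c :: L.reverse by simp,
    PySem.List.index?_cons_self]
  simp only [Option.getD_some, List.length_append, List.length_singleton]
  push_cast
  ring

lemma pvTerm_le_append_self {L : List Char} {c : Char} (hc : c ∈ L) :
    pvTerm L c ≤ pvTerm (L ++ [c]) c := by
  rw [pvTerm_append_self_mem hc]
  unfold pvTerm
  omega

lemma pvTerm_append_self_notmem {L : List Char} {c : Char} (hc : c ∉ L) :
    pvTerm (L ++ [c]) c = -1 := by
  unfold pvTerm
  rw [PySem.List.index?_append_singleton_self L c hc,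
    show (L ++ [c]).reverse = c :: L.reverse by simp,
    PySem.List.index?_cons_self]
  simp only [Option.getD_some, List.length_append, List.length_singleton]
  push_cast
  ring

lemma pvTerm_ge {L : List Char} {c : Char} (hc : c ∈ L) : -1 ≤ pvTerm L c := by
  obtain ⟨k, hk⟩ := pvIndexSome hc
  obtain ⟨j, hj⟩ := pvIndexSome (L := L.reverse) (List.mem_reverse.mpr hc)
  obtain ⟨hklt, hkc, hkmin⟩ := PySem.List.getElem_of_index?_eq_some hk
  obtain ⟨hjlt, hjc, -⟩ := PySem.List.getElem_of_index?_eq_some hj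
  have hjlen : j < L.length := by simpa using hjlt
  have hrev : L[L.length - 1 - j]'(by omega) = c := by
    rw [← hjc]; rw [List.getElem_reverse]
  have hle : k ≤ L.length - 1 - j := by
    by_contra h
    exact hkmin (L.length - 1 - j) (by omega) hrev
  unfold pvTerm
  rw [hk, hj]
  simp only [Option.getD_some]
  omega

lemma pvFoldlMax_init {α : Type} (xs : List α) (f : α → Int) (a b : Int) :
    xs.foldl (fun acc d => max acc (f d)) (max a b)
      = max (xs.foldl (fun acc d => max acc (f d)) a) b := by
  induction xs generalizing a with
  | nil => rfl
  | cons x xs ih =>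
    simp only [List.foldl_cons]
    rw [show max (max a b) (f x) = max (max a (f x)) b by omega, ih]

lemma pvFoldlMax_update {α : Type} (xs : List α) (f g : α → Int) (c : α)
    (hc : c ∈ xs) (hnd : xs.Nodup) (hne : ∀ d ∈ xs, d ≠ c → g d = f d)
    (hle : f c ≤ g c) (a : Int) :
    xs.foldl (fun acc d => max acc (g d)) a
      = max (xs.foldl (fun acc d => max acc (f d)) a) (g c) := by
  induction xs generalizing a with
  | nil => cases hc
  | cons x xs ih =>
    rcases List.mem_cons.mp hc with h | h
    · subst h
      have hx : c ∉ xs := (List.nodup_cons.mp hnd).1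
      have hfg : ∀ acc, ∀ d ∈ xs, (fun acc d => max acc (g d)) acc d = (fun acc d => max acc (f d)) acc d := by
        intro acc d hd
        simp [hne d (List.mem_cons_of_mem _ hd) (fun h => hx (h ▸ hd))]
      simp only [List.foldl_cons]
      rw [PySem.List.foldl_congr_mem xs _ _ _ hfg,
        show max a (g c) = max (max a (f c)) (g c) by omega, pvFoldlMax_init]
    · have hxc : x ≠ c := by rintro rfl; exact (List.nodup_cons.mp hnd).1 h
      simp only [List.foldl_cons]
      rw [hne x (List.mem_cons_self) hxc,
        ih h (List.nodup_cons.mp hnd).2 (fun d hd => hne d (List.mem_cons_of_mem _ hd))]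

-- maxD with the identity key and a default below every element is the running max
lemma pvMaxOptFold (xs : List Int) (a : Int) :
    PySem.List.max? (a :: xs) (fun y => y) = some (xs.foldl max a) := by
  induction xs generalizing a with
  | nil => rfl
  | cons x xs ih =>
    have h1 : PySem.List.max? (a :: x :: xs) (fun y => y)
        = PySem.List.max? (max a x :: xs) (fun y => y) := by
      simp only [PySem.List.max?, List.foldl_cons]
      congr 1
      show (if a < x then some x else some a) = some (max a x)
      split
      · rename_i h; rw [max_eq_right (le_of_lt h)]
      · rename_i h; rw [max_eq_left (not_lt.mp h)]
    rw [h1, ih, List.foldl_cons]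

lemma pvMaxD_eq_foldl (xs : List Int) (d : Int) (h : ∀ x ∈ xs, d ≤ x) :
    PySem.List.maxD xs (fun x => x) d = xs.foldl max d := by
  cases xs with
  | nil => rfl
  | cons x xs =>
    simp only [PySem.List.maxD]
    rw [pvMaxOptFold]
    simp only [Option.getD_some, List.foldl_cons]
    rw [show max d x = x from max_eq_right (h x List.mem_cons_self)]

lemma pvAnsA (L : List Char) :
    (pvAFold L).1 = ((PySem.Set.ofList L).map (pvTerm L)).foldl max (-1) := by
  induction L using List.reverseRecOn with
  | nil => simp [pvAFold, PySem.List.enumerate, PySem.Set.ofList]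
  | append_singleton L c ih =>
    rw [pvAFold_append]
    simp only [pvStepA]
    have hcont : (pvAFold L).2.contains c = (PySem.List.index? L c).isSome := by
      rw [PySem.Dict.contains_eq_isSome_get?, pvDictA L c]
      cases PySem.List.index? L c <;> rfl
    have hset : PySem.Set.ofList (L ++ [c]) = (PySem.Set.ofList L).add c := by
      rw [PySem.Set.ofList_eq_foldl, List.foldl_append, ← PySem.Set.ofList_eq_foldl]
      rfl
    by_cases hc : c ∈ L
    · rw [if_neg (by rw [hcont]; simp [hc])]
      obtain ⟨k, hk⟩ := pvIndexSome hc
      have hgd : (pvAFold L).2.getD c 0 = (k : Int) := by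
        rw [PySem.Dict.getD_eq_get?_getD, pvDictA L c, hk]
        rfl
      rw [hset, PySem.Set.add_of_mem ((PySem.Set.mem_ofList L c).mpr hc),
        List.foldl_map,
        pvFoldlMax_update (PySem.Set.ofList L) (pvTerm L) (pvTerm (L ++ [c])) c
          ((PySem.Set.mem_ofList L c).mpr hc) (PySem.Set.nodup_ofList L)
          (fun d hd hne => pvTerm_append_ne ((PySem.Set.mem_ofList L d).mp hd) hne)
          (pvTerm_le_append_self hc),
        ← List.foldl_map, ← ih, pvTerm_append_self_mem hc, hgd, hk]
      rfl
    · rw [if_pos (by rw [hcont]; simp [hc])]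
      rw [hset, PySem.Set.add_of_not_mem (fun h => hc ((PySem.Set.mem_ofList L c).mp h)),
        List.map_append, List.foldl_append]
      have hmap : (PySem.Set.ofList L).map (pvTerm (L ++ [c]))
          = (PySem.Set.ofList L).map (pvTerm L) := by
        apply List.map_congr_left
        intro d hd
        have hdL : d ∈ L := (PySem.Set.mem_ofList L d).mp hd
        exact pvTerm_append_ne hdL (fun h => hc (h ▸ hdL))
      rw [hmap, ← ih]
      simp only [List.map_cons, List.map_nil, List.foldl_cons, List.foldl_nil,
        pvTerm_append_self_notmem hc]
      have h1 : (-1 : Int) ≤ (pvAFold L).1 := by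
        rw [ih]
        exact (PySem.List.le_foldl_max _ _).1
      omega

-- ===== VERDICT (by name: the statement is the Claim_ definition above) =====
theorem solution_1097_4_spec : Claim_equal_solution_1097_4 := by
  intro s _
  unfold Spec_solution_1097_4 solution_1097_4 solution_1097_4_alt
  have hmap : List.map (fun c =>
        PySem.Str.len s - 2 - (((PySem.List.index? s.toList.reverse c).getD 0 : Nat) : Int)
          - (((PySem.List.index? s.toList c).getD 0 : Nat) : Int)) (PySem.Set.ofList s.toList)
      = List.map (pvTerm s.toList) (PySem.Set.ofList s.toList) := by
    apply List.map_congr_left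
    intro d _
    simp [pvTerm]
  have hterm : ∀ x ∈ List.map (pvTerm s.toList) (PySem.Set.ofList s.toList), (-1 : Int) ≤ x := by
    intro x hx
    obtain ⟨d, hd, rfl⟩ := List.mem_map.mp hx
    exact pvTerm_ge ((PySem.Set.mem_ofList _ d).mp hd)
  show (pvAFold s.toList).1
      = PySem.List.maxD (List.map (fun c =>
          PySem.Str.len s - 2 - (((PySem.List.index? s.toList.reverse c).getD 0 : Nat) : Int)
            - (((PySem.List.index? s.toList c).getD 0 : Nat) : Int)) (PySem.Set.ofList s.toList))
        (fun x => x) (-1)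
  rw [hmap, pvMaxD_eq_foldl _ _ hterm, pvAnsA]
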